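-- pv_equiv track=rewrite | github.com/Debog-Automations/AI_Doc_Analyzer | ui/tabs/results_tab.py | _get_ordered_columns
-- ===== SOURCE A (Python) =====
-- from typing import List, Dict, Any, Optional, Set
--
-- AI_COLUMNS: Set[str] = {
--     "Title", "Type", "AI Summary",
--     "As Of Dates", "Effective Date", "Executed Date", "Expiration Date",
--     "Currency", "Broker Name", "Carrier Name", "MGA Name", "Intermediary Name",
--     "Ceded Percent", "Commission Rates",
--     "GWP Actual", "GWP Estimated", "NWP Actual", "NWP Estimated",
--     "Lines of Business", "Parties", "Signers", "Sections/Chapters",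
--     "Countries", "States", "Key Entities", "Table Names", "All Values"
-- }
--
-- METADATA_COLUMNS: Set[str] = {
--     "FileName", "file_path", "source_path", "File Extension", "file_extension",
--     "Document Size", "Document Size Formatted", "file_size",
--     "File Hash", "file_hash", "Has Been Processed",
--     "Adobe Document ID", "Docusign Document ID", "E-signature ID",
--     "Document Title", "Author", "Subject", "Creator", "Producer",
--     "Creation Date", "Modification Date", "Page Count",
--     "Comment", "MIME Type", "File Created At", "File Modified At",
--     "source_type", "processed_at", "id", "error_message"
-- }
--
-- STATUS_COLUMN = "Status"
--
-- def get_column_category(column_name: str) -> str: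
--     """
--     Determine the category of a column.
--
--     Returns:
--         'ai' for AI-extracted columns
--         'metadata' for programmatic metadata columns
--         'status' for status column
--         'unknown' for unclassified columns (treated as AI)
--     """
--     if column_name == STATUS_COLUMN:
--         return 'status'
--     elif column_name in AI_COLUMNS:
--         return 'ai'
--     elif column_name in METADATA_COLUMNS:
--         return 'metadata'
--     else:
--         # Unknown columns are assumed to be AI-extracted (custom questions can add new ones)
--         return 'ai'
--
-- def _get_ordered_columns(all_keys: Set[str]) -> List[str]:
--     """
--     Get columns in the correct order:
--     1. Status, FileName (always first)
--     2. AI columns grouped together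
--     3. Metadata columns grouped together
--     """
--     # Remove internal/hidden keys
--     display_keys = set(k for k in all_keys if not k.startswith('_'))
--
--     # Priority columns (always first)
--     priority_cols = ["Status", "FileName"]
--
--     # Separate into categories
--     ai_cols = []
--     metadata_cols = []
--
--     for key in display_keys:
--         if key in priority_cols:
--             continue
--
--         category = get_column_category(key)
--         if category in ('ai', 'unknown'):
--             ai_cols.append(key)
--         else:
--             metadata_cols.append(key)
--
--     # Sort within categories
--     ai_cols.sort()
--     metadata_cols.sort()
--
--     # Build final order
--     ordered = []
--     for col in priority_cols:
--         if col in display_keys: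
--             ordered.append(col)
--
--     ordered.extend(ai_cols)
--     ordered.extend(metadata_cols)
--
--     return ordered
-- ===== SOURCE B (Python) =====
-- from typing import List, Set
--
-- METADATA_COLUMNS: Set[str] = {
--     "FileName", "file_path", "source_path", "File Extension", "file_extension",
--     "Document Size", "Document Size Formatted", "file_size",
--     "File Hash", "file_hash", "Has Been Processed",
--     "Adobe Document ID", "Docusign Document ID", "E-signature ID",
--     "Document Title", "Author", "Subject", "Creator", "Producer",
--     "Creation Date", "Modification Date", "Page Count",
--     "Comment", "MIME Type", "File Created At", "File Modified At",
--     "source_type", "processed_at", "id", "error_message"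
-- }
--
-- def _rank(key: str) -> int:
--     # priority names first, then ai/unknown (default), then metadata
--     if key == "Status":
--         return 0
--     if key == "FileName":
--         return 1
--     if key in METADATA_COLUMNS:
--         return 3
--     return 2
--
-- def _get_ordered_columns(all_keys: Set[str]) -> List[str]:
--     return sorted({k for k in all_keys if not k.startswith('_')},
--                   key=lambda k: (_rank(k), k))
-- ===== Notes on version B (the rewrite author's own statement) =====
-- stated objective: simpler
-- what changed: Replaces the three-bucket partition (two accumulator lists, two separate sorts, then a priority-membership pass and two extends) by one sort of the filtered keys under a composite key (rank, name), where rank places Status, FileName, ai/unknown, metadata in that order.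
import Mathlib
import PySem

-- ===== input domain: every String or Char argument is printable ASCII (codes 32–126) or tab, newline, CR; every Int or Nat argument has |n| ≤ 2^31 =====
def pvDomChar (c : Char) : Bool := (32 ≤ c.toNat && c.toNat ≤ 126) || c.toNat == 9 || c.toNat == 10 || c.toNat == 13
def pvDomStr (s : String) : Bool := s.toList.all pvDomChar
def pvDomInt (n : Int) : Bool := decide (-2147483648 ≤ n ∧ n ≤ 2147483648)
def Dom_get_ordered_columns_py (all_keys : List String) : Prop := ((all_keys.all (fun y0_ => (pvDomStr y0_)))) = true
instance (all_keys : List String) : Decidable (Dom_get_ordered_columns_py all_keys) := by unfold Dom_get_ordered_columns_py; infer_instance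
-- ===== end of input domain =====

-- B replaces A's three-bucket partition + two sorts + priority-membership pass by a single
-- sort of the filtered keys under a composite (rank, name) key (objective: simpler).

-- ===== PORT A =====
def AI_COLUMNS : PySem.Set String := PySem.Set.ofList
  ["Title", "Type", "AI Summary",
   "As Of Dates", "Effective Date", "Executed Date", "Expiration Date",
   "Currency", "Broker Name", "Carrier Name", "MGA Name", "Intermediary Name",
   "Ceded Percent", "Commission Rates",
   "GWP Actual", "GWP Estimated", "NWP Actual", "NWP Estimated",
   "Lines of Business", "Parties", "Signers", "Sections/Chapters",
   "Countries", "States", "Key Entities", "Table Names", "All Values"]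

def METADATA_COLUMNS : PySem.Set String := PySem.Set.ofList
  ["FileName", "file_path", "source_path", "File Extension", "file_extension",
   "Document Size", "Document Size Formatted", "file_size",
   "File Hash", "file_hash", "Has Been Processed",
   "Adobe Document ID", "Docusign Document ID", "E-signature ID",
   "Document Title", "Author", "Subject", "Creator", "Producer",
   "Creation Date", "Modification Date", "Page Count",
   "Comment", "MIME Type", "File Created At", "File Modified At",
   "source_type", "processed_at", "id", "error_message"]

def STATUS_COLUMN : String := "Status"

def get_column_category (column_name : String) : String :=
  if column_name == STATUS_COLUMN then "status"
  else if PySem.Set.contains AI_COLUMNS column_name then "ai"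
  else if PySem.Set.contains METADATA_COLUMNS column_name then "metadata"
  else "ai"

def get_ordered_columns_py (all_keys : List String) : List String :=
  let display_keys : PySem.Set String :=
    PySem.Set.ofList (all_keys.filter (fun k => !(PySem.Str.startswith k "_")))
  let priority_cols : List String := ["Status", "FileName"]
  let acc := display_keys.foldl
    (fun (p : List String × List String) key =>
      if priority_cols.contains key then p
      else
        let category := get_column_category key
        if category == "ai" || category == "unknown" then (p.1 ++ [key], p.2)
        else (p.1, p.2 ++ [key])) ([], [])
  let ai_cols := PySem.List.sorted acc.1 (fun x => x) false
  let metadata_cols := PySem.List.sorted acc.2 (fun x => x) false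
  let ordered := priority_cols.foldl
    (fun o col => if PySem.Set.contains display_keys col then o ++ [col] else o) []
  ordered ++ ai_cols ++ metadata_cols

-- ===== PORT B =====
def rank_col (key : String) : Int :=
  if key == "Status" then 0
  else if key == "FileName" then 1
  else if PySem.Set.contains METADATA_COLUMNS key then 3
  else 2

def get_ordered_columns_py_alt (all_keys : List String) : List String :=
  PySem.List.sorted2
    (PySem.Set.ofList (all_keys.filter (fun k => !(PySem.Str.startswith k "_"))))
    rank_col (fun k => k) false

-- ===== PRECONDITION & SPEC =====
def Spec_get_ordered_columns_py (all_keys : List String) (out : List String) : Prop := out = get_ordered_columns_py_alt all_keys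
instance (all_keys : List String) (out : List String) : Decidable (Spec_get_ordered_columns_py all_keys out) := by unfold Spec_get_ordered_columns_py; infer_instance

-- ===== CLAIM (what is proved, stated in full; the proofs are below) =====
def Claim_equal_get_ordered_columns_py : Prop := ∀ (all_keys : List String), Dom_get_ordered_columns_py all_keys → Spec_get_ordered_columns_py all_keys (get_ordered_columns_py all_keys)

-- ===== LEMMAS AND PROOFS =====


def Kc (a : String) : Lex (Int × String) := toLex (rank_col a, a)

def pPrio (k : String) : Bool := (["Status", "FileName"] : List String).contains k
def isAI (k : String) : Bool := get_column_category k == "ai" || get_column_category k == "unknown"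
def pA (k : String) : Bool := !pPrio k && isAI k
def pM (k : String) : Bool := !pPrio k && !isAI k

theorem Kc_lt_of_rank_lt {a b : String} (h : rank_col a < rank_col b) : Kc a < Kc b :=
  Prod.Lex.toLex_lt_toLex.mpr (Or.inl h)

theorem Kc_lt_of_rank_eq {a b : String} (he : rank_col a = rank_col b) (h : a < b) :
    Kc a < Kc b :=
  Prod.Lex.toLex_lt_toLex.mpr (Or.inr ⟨he, h⟩)

theorem before_eq (a b : String) :
    (decide (rank_col a < rank_col b) ||
      (!decide (rank_col b < rank_col a) && decide (a < b))) = decide (Kc a < Kc b) := by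
  by_cases h1 : rank_col a < rank_col b
  · have h : Kc a < Kc b := Kc_lt_of_rank_lt h1
    simp [h1, h]
  · by_cases h2 : rank_col b < rank_col a
    · have h : ¬ Kc a < Kc b := by
        intro hlt
        rcases Prod.Lex.toLex_lt_toLex.mp hlt with h | h
        · exact h1 h
        · exact absurd h.1 (by omega)
      simp [h1, h2, h]
    · have he : rank_col a = rank_col b := by omega
      by_cases h3 : a < b
      · have h : Kc a < Kc b := Kc_lt_of_rank_eq he h3
        simp [h1, h2, h3, h]
      · have h : ¬ Kc a < Kc b := by
          intro hlt
          rcases Prod.Lex.toLex_lt_toLex.mp hlt with h | h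
          · exact h1 h
          · exact h3 h.2
        simp [h1, h2, h3, h]

theorem sorted2_eq_sorted_K (xs : List String) :
    PySem.List.sorted2 xs rank_col (fun k => k) false = PySem.List.sorted xs Kc := by
  have hb : (fun (a b : String) =>
        decide (rank_col a < rank_col b) ||
          (!decide (rank_col b < rank_col a) && decide (a < b))) =
      (fun a b => decide (Kc a < Kc b)) := by
    funext a b; exact before_eq a b
  calc PySem.List.sorted2 xs rank_col (fun k => k) false
      = List.foldl (fun acc x => PySem.List.insertBy
          (fun a b => decide (rank_col a < rank_col b) ||
            (!decide (rank_col b < rank_col a) && decide (a < b))) x acc) [] xs := rfl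
    _ = List.foldl (fun acc x => PySem.List.insertBy
          (fun a b => decide (Kc a < Kc b)) x acc) [] xs := by rw [hb]
    _ = PySem.List.sorted xs Kc := (PySem.List.sorted_eq_foldl_insertBy xs Kc).symm

theorem fold_partition (l : List String) (a b : List String) :
    l.foldl (fun (p : List String × List String) key =>
      if (["Status", "FileName"] : List String).contains key then p
      else
        let category := get_column_category key
        if category == "ai" || category == "unknown" then (p.1 ++ [key], p.2)
        else (p.1, p.2 ++ [key])) (a, b)
    = (a ++ l.filter pA, b ++ l.filter pM) := by
  induction l generalizing a b with
  | nil => simp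
  | cons x t ih =>
    rw [List.foldl_cons, List.filter_cons, List.filter_cons]
    by_cases hp : pPrio x
    · have h1 : pA x = false := by simp [pA, hp]
      have h2 : pM x = false := by simp [pM, hp]
      have hc : (["Status", "FileName"] : List String).contains x = true := hp
      simp only [hc, if_true, h1, h2, Bool.false_eq_true, if_false]
      exact ih a b
    · have hc : (["Status", "FileName"] : List String).contains x = false := by
        simpa [pPrio] using hp
      by_cases hai : isAI x
      · have h1 : pA x = true := by simp [pA, hp, hai]
        have h2 : pM x = false := by simp [pM, hai]
        have hcat : (get_column_category x == "ai" || get_column_category x == "unknown") = true := hai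
        simp only [hc, Bool.false_eq_true, if_false, hcat, if_true, h1, h2, ih]
        simp
      · have h1 : pA x = false := by simp [pA, hai]
        have h2 : pM x = true := by simp [pM, hp, hai]
        have hcat : (get_column_category x == "ai" || get_column_category x == "unknown") = false := by
          simpa [isAI] using hai
        simp only [hc, Bool.false_eq_true, if_false, hcat, h1, h2, if_true, ih]
        simp

theorem cat_ne_unknown (k : String) : get_column_category k ≠ "unknown" := by
  unfold get_column_category
  split_ifs <;> decide

theorem ai_meta_disjoint :
    AI_COLUMNS.all (fun c => !(PySem.Set.contains METADATA_COLUMNS c)) = true := by decide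

theorem rank_of_pA (k : String) (h : pA k = true) : rank_col k = 2 := by
  simp only [pA, Bool.and_eq_true, Bool.not_eq_true'] at h
  obtain ⟨hp, hai⟩ := h
  simp only [pPrio, List.contains_cons, List.contains_nil, Bool.or_false,
    Bool.or_eq_false_iff, beq_eq_false_iff_ne, ne_eq] at hp
  obtain ⟨hS, hF⟩ := hp
  have hcat : get_column_category k = "ai" := by
    rcases Bool.or_eq_true_iff.mp hai with h | h
    · exact eq_of_beq h
    · exact absurd (eq_of_beq h) (cat_ne_unknown k)
  have hm : PySem.Set.contains METADATA_COLUMNS k = false := by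
    unfold get_column_category at hcat
    split_ifs at hcat with c1 c2 c3
    · exact absurd hcat (by decide)
    · -- k ∈ AI_COLUMNS: use disjointness
      have hmem : k ∈ (AI_COLUMNS : List String) := List.contains_iff_mem.mp c2
      have := List.all_eq_true.mp ai_meta_disjoint k hmem
      simpa using this
    · exact absurd hcat (by decide)
    · simpa using c3
  simp only [rank_col, beq_iff_eq, hS, hF, if_false, hm, Bool.false_eq_true]

theorem rank_of_pM (k : String) (h : pM k = true) : rank_col k = 3 := by
  simp only [pM, Bool.and_eq_true, Bool.not_eq_true'] at h
  obtain ⟨hp, hai⟩ := h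
  simp only [pPrio, List.contains_cons, List.contains_nil, Bool.or_false,
    Bool.or_eq_false_iff, beq_eq_false_iff_ne, ne_eq] at hp
  obtain ⟨hS, hF⟩ := hp
  have hcat : get_column_category k ≠ "ai" := by
    intro hc
    simp [isAI, hc] at hai
  have hm : PySem.Set.contains METADATA_COLUMNS k = true := by
    unfold get_column_category at hcat
    split_ifs at hcat with c1 c2 c3
    · exact absurd (eq_of_beq c1) hS
    · exact absurd rfl hcat
    · exact c3
    · exact absurd rfl hcat
  simp only [rank_col, beq_iff_eq, hS, hF, if_false, hm, if_true]

theorem pairwise_sorted_block (D : List String) (hD : D.Nodup) (p : String → Bool)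
    (r : Int) (hr : ∀ k, p k = true → rank_col k = r) :
    (PySem.List.sorted (D.filter p) (fun x => x)).Pairwise (fun a b => Kc a < Kc b) := by
  have hnd : (PySem.List.sorted (D.filter p) (fun x => x)).Nodup :=
    (PySem.List.sorted_perm (D.filter p) (fun x => x) false).nodup_iff.mpr (hD.filter p)
  have hle := PySem.List.sorted_pairwise (D.filter p) (fun x => x)
  refine (hle.and hnd).imp_of_mem ?_
  intro a b ha hb hab
  have hpa : p a = true := (List.mem_filter.mp ((PySem.List.mem_sorted _ _ _ _).mp ha)).2
  have hpb : p b = true := (List.mem_filter.mp ((PySem.List.mem_sorted _ _ _ _).mp hb)).2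
  exact Kc_lt_of_rank_eq ((hr a hpa).trans (hr b hpb).symm) (lt_of_le_of_ne hab.1 hab.2)

theorem mem_ite_singleton {c : Prop} [Decidable c] {x a : String}
    (h : a ∈ (if c then ([x] : List String) else [])) : a = x := by
  split_ifs at h <;> simp_all

theorem mem_block_rank {D : List String} {p : String → Bool} {r : Int}
    (hr : ∀ k, p k = true → rank_col k = r) {a : String}
    (ha : a ∈ PySem.List.sorted (D.filter p) (fun x => x)) : rank_col a = r :=
  hr a (List.mem_filter.mp ((PySem.List.mem_sorted _ _ _ _).mp ha)).2

theorem assemble (D : List String) (hD : D.Nodup) :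
    PySem.List.sorted D Kc =
      ((if "Status" ∈ D then (["Status"] : List String) else []) ++
        (if "FileName" ∈ D then (["FileName"] : List String) else []))
      ++ PySem.List.sorted (D.filter pA) (fun x => x)
      ++ PySem.List.sorted (D.filter pM) (fun x => x) := by
  have memP : ∀ a, a ∈ ((if "Status" ∈ D then (["Status"] : List String) else []) ++
      (if "FileName" ∈ D then (["FileName"] : List String) else [])) ↔
      (a ∈ D ∧ pPrio a = true) := by
    intro a
    constructor
    · intro h
      rcases List.mem_append.mp h with h | h
      · split_ifs at h with hS
        · simp at h; subst h; exact ⟨hS, by decide⟩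
        · simp at h
      · split_ifs at h with hF
        · simp at h; subst h; exact ⟨hF, by decide⟩
        · simp at h
    · rintro ⟨hmem, hprio⟩
      simp only [pPrio, List.contains_cons, List.contains_nil, Bool.or_false,
        Bool.or_eq_true_iff, beq_iff_eq] at hprio
      rcases hprio with h | h <;> subst h
      · exact List.mem_append.mpr (Or.inl (by simp [hmem]))
      · exact List.mem_append.mpr (Or.inr (by simp [hmem]))
  have hpairA := pairwise_sorted_block D hD pA 2 rank_of_pA
  have hpairM := pairwise_sorted_block D hD pM 3 rank_of_pM
  have hpair : (((if "Status" ∈ D then (["Status"] : List String) else []) ++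
        (if "FileName" ∈ D then (["FileName"] : List String) else []))
      ++ PySem.List.sorted (D.filter pA) (fun x => x)
      ++ PySem.List.sorted (D.filter pM) (fun x => x)).Pairwise (fun a b => Kc a < Kc b) := by
    rw [List.append_assoc, List.pairwise_append, List.pairwise_append, List.pairwise_append]
    refine ⟨⟨?_, ?_, ?_⟩, ⟨hpairA, hpairM, ?_⟩, ?_⟩
    · split_ifs <;> simp
    · split_ifs <;> simp
    · intro a ha b hb
      rw [mem_ite_singleton ha, mem_ite_singleton hb]
      exact Kc_lt_of_rank_lt (by decide)
    · intro a ha b hb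
      have hra := mem_block_rank rank_of_pA ha
      have hrb := mem_block_rank rank_of_pM hb
      exact Kc_lt_of_rank_lt (by omega)
    · intro a ha b hb
      have hra : rank_col a = 0 ∨ rank_col a = 1 := by
        rcases List.mem_append.mp ha with h | h
        · rw [mem_ite_singleton h]; left; decide
        · rw [mem_ite_singleton h]; right; decide
      have hrb : rank_col b = 2 ∨ rank_col b = 3 := by
        rcases List.mem_append.mp hb with h | h
        · exact Or.inl (mem_block_rank rank_of_pA h)
        · exact Or.inr (mem_block_rank rank_of_pM h)
      exact Kc_lt_of_rank_lt (by omega)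
  apply PySem.List.sorted_eq_of_perm_of_pairwise_lt _ _ _ ?_ hpair
  -- permutation
  have hnodup : (((if "Status" ∈ D then (["Status"] : List String) else []) ++
        (if "FileName" ∈ D then (["FileName"] : List String) else []))
      ++ PySem.List.sorted (D.filter pA) (fun x => x)
      ++ PySem.List.sorted (D.filter pM) (fun x => x)).Nodup := by
    refine hpair.imp ?_
    intro a b hlt heq
    subst heq
    exact lt_irrefl _ hlt
  rw [List.perm_ext_iff_of_nodup hnodup hD]
  intro a
  constructor
  · intro h
    rcases List.mem_append.mp h with h | h
    · rcases List.mem_append.mp h with h | h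
      · exact ((memP a).mp h).1
      · exact (List.mem_filter.mp ((PySem.List.mem_sorted _ _ _ _).mp h)).1
    · exact (List.mem_filter.mp ((PySem.List.mem_sorted _ _ _ _).mp h)).1
  · intro hmem
    by_cases hprio : pPrio a = true
    · exact List.mem_append.mpr (Or.inl (List.mem_append.mpr
        (Or.inl ((memP a).mpr ⟨hmem, hprio⟩))))
    · by_cases hai : isAI a = true
      · refine List.mem_append.mpr (Or.inl (List.mem_append.mpr (Or.inr ?_)))
        rw [PySem.List.mem_sorted]
        exact List.mem_filter.mpr ⟨hmem, by simp [pA, hprio, hai]⟩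
      · refine List.mem_append.mpr (Or.inr ?_)
        rw [PySem.List.mem_sorted]
        exact List.mem_filter.mpr ⟨hmem, by simp [pM, hprio, hai]⟩

theorem ordered_fold (D : List String) :
    (["Status", "FileName"] : List String).foldl
      (fun o col => if PySem.Set.contains D col then o ++ [col] else o) []
    = ((if "Status" ∈ D then (["Status"] : List String) else []) ++
        (if "FileName" ∈ D then (["FileName"] : List String) else [])) := by
  simp only [List.foldl_cons, List.foldl_nil, PySem.Set.contains]
  by_cases hS : "Status" ∈ D <;> by_cases hF : "FileName" ∈ D <;>
    simp [hS, hF]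

theorem get_ordered_columns_py_main (all_keys : List String) :
    get_ordered_columns_py all_keys = get_ordered_columns_py_alt all_keys := by
  simp only [get_ordered_columns_py, get_ordered_columns_py_alt]
  rw [sorted2_eq_sorted_K]
  set D : List String :=
    PySem.Set.ofList (all_keys.filter (fun k => !(PySem.Str.startswith k "_"))) with hDdef
  have hD : D.Nodup := PySem.Set.nodup_ofList _
  rw [fold_partition, ordered_fold, assemble D hD]
  simp

-- ===== VERDICT (by name: the statement is the Claim_ definition above) =====
theorem get_ordered_columns_py_spec : Claim_equal_get_ordered_columns_py := by
  intro all_keys _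
  exact get_ordered_columns_py_main all_keys
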